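-- pv_equiv track=rewrite | github.com/TaiXuan91/FiatLuxCore | ascii_engine.py | display_prepare
-- ===== SOURCE A (Python) =====
-- screen_width=80-1 #the last one for '\n'
--
-- screen_height=25-1 #the last one for input command
--
-- def return_space(n): #return a string of n sapces
--     s=''
--     for i in range(n):
--         s+=' '
--     return s
--
-- def display_prepare(text): #return the data to display.text is a string.
--     data=list()
--     for i in range(screen_height):
--         if i==0:
--             s=''
--             for j in range(screen_width):
--                 s+='-'
--             data.append(s)
--         elif i<screen_height-1:
--             s=''
--             s+='|'
--             for j in range(screen_width-2): # -2 for two '|' each side of screen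
--                 if len(text)<=j:
--                     l= screen_width-1-len(s)
--                     s+=return_space(l)
--                     text=''
--                     break
--                 ch=text[j]
--                 if ch!='\r' and ch!='\n':
--                     s+=ch
--                 else:
--                     text=text[j+1:]
--                     break
--             else:
--                 text=text[j+1:]
--             if len(s)<screen_width-1:
--                 l= screen_width-1-len(s)
--                 s+=return_space(l)
--             s+='|'
--             data.append(s)
--         else:
--             s=''
--             for j in range(screen_width):
--                 s+='-'
--             data.append(s)
--
--     return data,text # also return the text that is not yet displayed
-- ===== SOURCE B (Python) =====
-- def display_prepare(text): #return the data to display.text is a string.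
--     data = []
--     for i in range(24):
--         if i == 0 or i == 23:
--             data.append('-' * 79)
--         else:
--             chunk = text[:77]
--             ks = [k for k in (chunk.find('\r'), chunk.find('\n')) if k != -1]
--             if ks:
--                 k = min(ks)
--                 content, text = text[:k], text[k+1:]
--             elif len(text) <= 77:
--                 content, text = text, ''
--             else:
--                 content, text = text[:77], text[77:]
--             data.append('|' + content + ' ' * (77 - len(content)) + '|')
--     return data, text
-- ===== Notes on version B (the rewrite author's own statement) =====
-- stated objective: simpler
-- what changed: A builds each content row char-by-char in an inner loop with break/for-else and an accumulated string; B extracts each line at once by slicing the first 77 characters, locating the first CR or LF with str.find, and padding the row to width with a single space-multiplication.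
import Mathlib
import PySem

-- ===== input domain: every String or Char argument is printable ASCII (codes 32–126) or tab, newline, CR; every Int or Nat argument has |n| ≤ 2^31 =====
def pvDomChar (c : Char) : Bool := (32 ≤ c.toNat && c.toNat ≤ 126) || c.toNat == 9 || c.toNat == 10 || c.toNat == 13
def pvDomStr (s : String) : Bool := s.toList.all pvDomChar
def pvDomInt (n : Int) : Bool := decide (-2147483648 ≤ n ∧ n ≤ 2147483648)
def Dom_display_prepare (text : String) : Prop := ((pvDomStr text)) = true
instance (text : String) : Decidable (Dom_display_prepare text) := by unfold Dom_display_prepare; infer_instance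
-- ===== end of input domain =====

-- B replaces A's char-by-char inner loop (break/for-else) with slice + find line extraction; objective: simpler.

-- ===== PORT A =====
-- return_space(n): builds a string of n spaces by a loop
def returnSpaceA (n : Nat) : List Char := (List.range n).foldl (fun s _ => s ++ [' ']) []

-- the row of dashes built by A's inner loop over range(screen_width)
def dashesA : List Char := (List.range 79).foldl (fun s _ => s ++ ['-']) []

-- A's inner `for j in range(screen_width-2)` loop with its break / for-else, step for step;
-- returns (s after the loop incl. the in-loop padding branch, remaining text)
def loopA (text : List Char) (j : Nat) (s : List Char) : List Char × List Char :=
  if _h : j < 77 then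
    if text.length ≤ j then
      (s ++ returnSpaceA (78 - s.length), [])          -- len(text)<=j: pad, text=''
    else
      match text[j]? with
      | some ch =>
        if ch ≠ '\r' ∧ ch ≠ '\n' then loopA text (j + 1) (s ++ [ch])
        else (s, text.drop (j + 1))                    -- break: text=text[j+1:]
      | none => (s, text)                              -- unreachable (j < text.length)
  else (s, text.drop 77)                               -- for-else: text=text[j+1:] with j=76
termination_by 77 - j

-- one content row of A: inner loop from s='|', then the post-loop pad, then s+='|'
def rowA (text : List Char) : List Char × List Char :=
  let r := loopA text 0 ['|']
  let s := if r.1.length < 78 then r.1 ++ returnSpaceA (78 - r.1.length) else r.1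
  (s ++ ['|'], r.2)

def display_prepare (text : String) : List String × String :=
  let r := (List.range 24).foldl
    (fun (st : List (List Char) × List Char) i =>
      if i = 0 then (st.1 ++ [dashesA], st.2)
      else if i < 23 then
        let rw := rowA st.2
        (st.1 ++ [rw.1], rw.2)
      else (st.1 ++ [dashesA], st.2))
    ([], text.toList)
  (r.1.map String.mk, String.mk r.2)

-- ===== PORT B =====
-- one content row of B: chunk = text[:77]; first '\r'/'\n' in the chunk decides the line
def stepB (text : List Char) : List Char × List Char :=
  let chunk := text.take 77
  match chunk.findIdx? (fun c => c = '\r' || c = '\n') with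
  | some k => (text.take k, text.drop (k + 1))
  | none =>
    if text.length ≤ 77 then (text, [])
    else (text.take 77, text.drop 77)

def mkRowB (content : List Char) : List Char :=
  '|' :: (content ++ List.replicate (77 - content.length) ' ' ++ ['|'])

def display_prepare_alt (text : String) : List String × String :=
  let r := (List.range 24).foldl
    (fun (st : List (List Char) × List Char) i =>
      if i = 0 ∨ i = 23 then (st.1 ++ [List.replicate 79 '-'], st.2)
      else
        let rw := stepB st.2
        (st.1 ++ [mkRowB rw.1], rw.2))
    ([], text.toList)
  (r.1.map String.mk, String.mk r.2)

-- ===== PRECONDITION & SPEC =====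
def Spec_display_prepare (text : String) (out : List String × String) : Prop := out = display_prepare_alt text
instance (text : String) (out : List String × String) : Decidable (Spec_display_prepare text out) := by unfold Spec_display_prepare; infer_instance

-- ===== CLAIM (what is proved, stated in full; the proofs are below) =====
def Claim_equal_display_prepare : Prop := ∀ (text : String), Dom_display_prepare text → Spec_display_prepare text (display_prepare text)

-- ===== LEMMAS AND PROOFS =====

theorem returnSpaceA_eq (n : Nat) : returnSpaceA n = List.replicate n ' ' := by
  induction n with
  | zero => rfl
  | succ m ih =>
    rw [List.replicate_succ']
    rw [← ih]
    simp [returnSpaceA, List.range_succ]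

theorem loopA_eq (text : List Char) (j : Nat) (hj : j ≤ 77) (hjt : j ≤ text.length)
    (pre : List Char) (hs : pre.length = j + 1) :
    loopA text j pre =
      match ((text.drop j).take (77 - j)).findIdx? (fun c => c = '\r' || c = '\n') with
      | some k => (pre ++ (text.drop j).take k, text.drop (j + 1 + k))
      | none =>
        if text.length ≤ 77
        then (pre ++ text.drop j ++ List.replicate (77 - text.length) ' ', [])
        else (pre ++ (text.drop j).take (77 - j), text.drop 77) := by
  induction hn : 77 - j generalizing j pre with
  | zero =>
    have hj77 : j = 77 := by omega
    subst hj77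
    rw [loopA]
    simp only [lt_irrefl, dite_false]
    by_cases hl : text.length ≤ 77
    · have : text.length = 77 := by omega
      simp [this, List.drop_of_length_le]
    · simp [if_neg hl]
  | succ n ih =>
    have hj77 : j < 77 := by omega
    rw [loopA]
    simp only [hj77, dite_true]
    by_cases hl : text.length ≤ j
    · have hlj : text.length = j := by omega
      have hd : text.drop j = [] := List.drop_of_length_le hl
      simp [hd, hs, returnSpaceA_eq, hlj]
      congr 1
      omega
    · have hl : j < text.length := by omega
      have hget : text[j]? = some (text[j]'hl) := List.getElem?_eq_getElem hl
      have hdj : text.drop j = text[j]'hl :: text.drop (j + 1) :=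
        List.drop_eq_getElem_cons hl
      simp only [if_neg (Nat.not_le_of_lt hl), hget]
      set ch := text[j]'hl with hch
      have htk : (text.drop j).take (n + 1) = ch :: (text.drop (j + 1)).take n := by
        rw [hdj, List.take_succ_cons]
      by_cases hnl : ch ≠ '\r' ∧ ch ≠ '\n'
      · rw [if_pos hnl]
        rw [ih (j + 1) (by omega) hl (pre ++ [ch]) (by simp [hs]) (by omega)]
        have hp : (decide (ch = '\r') || decide (ch = '\n')) = false := by
          simp [hnl.1, hnl.2]
        rw [htk, List.findIdx?_cons]
        rw [hp]
        simp only [Bool.false_eq_true, if_false]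
        cases hfi : ((text.drop (j + 1)).take n).findIdx? (fun c => decide (c = '\r') || decide (c = '\n')) with
        | none =>
          simp only [Option.map_none]
          by_cases hl77 : text.length ≤ 77
          · simp [hl77, hdj]
          · simp [hl77]
        | some k =>
          simp only [Option.map_some]
          have h2 : (text.drop j).take (k + 1) = ch :: (text.drop (j + 1)).take k := by
            rw [hdj, List.take_succ_cons]
          simp only [h2]
          refine Prod.ext ?_ ?_
          · simp
          · simp only []
            congr 1
            omega
      · rw [if_neg hnl]
        have hp : (decide (ch = '\r') || decide (ch = '\n')) = true := by
          rcases not_and_or.mp hnl with h | h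
          · simp [not_not.mp h]
          · simp [not_not.mp h]
        rw [htk, List.findIdx?_cons]
        rw [hp]
        simp

theorem row_eq (text : List Char) : rowA text = (mkRowB (stepB text).1, (stepB text).2) := by
  unfold rowA stepB mkRowB
  rw [loopA_eq text 0 (by omega) (by omega) ['|'] rfl]
  simp only [List.drop_zero, Nat.sub_zero]
  cases hfi : (text.take 77).findIdx? (fun c => decide (c = '\r') || decide (c = '\n')) with
  | some k =>
    have hk : k < (text.take 77).length := List.findIdx?_eq_some_iff_findIdx_eq.mp hfi |>.1
    have hk77 : k < 77 := lt_of_lt_of_le hk (by simp [List.length_take])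
    have hkl : k < text.length := lt_of_lt_of_le hk (by simp [List.length_take])
    have hlen : (['|'] ++ text.take k).length = k + 1 := by
      simp [List.length_take, Nat.min_eq_left (le_of_lt hkl)]
    simp only [hlen, returnSpaceA_eq]
    rw [if_pos (by omega : k + 1 < 78)]
    have : 78 - (k + 1) = 77 - k := by omega
    rw [this]
    simp [List.length_take, Nat.min_eq_left (le_of_lt hkl)]
    omega
  | none =>
    by_cases hl : text.length ≤ 77
    · simp only [if_pos hl]
      have hlen : (['|'] ++ text ++ List.replicate (77 - text.length) ' ').length = 78 := by
        simp; omega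
      rw [hlen]
      rw [if_neg (by omega : ¬ (78 < 78))]
      simp
    · simp only [if_neg hl]
      have hlen : (['|'] ++ text.take 77).length = 78 := by
        simp [List.length_take]; omega
      rw [hlen]
      rw [if_neg (by omega : ¬ (78 < 78))]
      simp [List.length_take]
      omega

-- ===== VERDICT (by name: the statement is the Claim_ definition above) =====
theorem display_prepare_spec : Claim_equal_display_prepare := by
  intro text _
  unfold Spec_display_prepare display_prepare display_prepare_alt
  have hd : dashesA = List.replicate 79 '-' := by decide
  have hstep : ∀ (st : List (List Char) × List Char), ∀ i ∈ List.range 24,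
      (if i = 0 then (st.1 ++ [dashesA], st.2)
       else if i < 23 then
         let rw := rowA st.2
         (st.1 ++ [rw.1], rw.2)
       else (st.1 ++ [dashesA], st.2)) =
      (if i = 0 ∨ i = 23 then (st.1 ++ [List.replicate 79 '-'], st.2)
       else
         let rw := stepB st.2
         (st.1 ++ [mkRowB rw.1], rw.2)) := by
    intro st i hi
    rw [List.mem_range] at hi
    by_cases h0 : i = 0
    · simp [h0, hd]
    · by_cases h23 : i = 23
      · simp [h23, hd]
      · have hlt : i < 23 := by omega
        simp only [if_neg h0, if_pos hlt, if_neg (by tauto : ¬ (i = 0 ∨ i = 23))]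
        simp [row_eq st.2]
  have hfold := List.foldl_ext _ _ ([], text.toList) hstep
  simp only [hfold]
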